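-- pv_equiv track=rewrite | github.com/alonsocanov/Algorithms | strings.py | snake_sring
-- ===== SOURCE A (Python) =====
-- def snake_sring(string):
--     result = []
--     # height of the snake 3
--     for i in range(1, len(string), 4):
--         result.append(string[i])
--     for i in range(0, len(string), 2):
--         result.append(string[i])
--     for i in range(3, len(string), 4):
--         result.append(string[i])
--     return ''.join(result)
-- ===== SOURCE B (Python) =====
-- def snake_sring(string):
--     top, mid, bot = [], [], []
--     for i, c in enumerate(string):
--         r = i % 4
--         if r == 1:
--             top.append(c)
--         elif r == 3:
--             bot.append(c)
--         else:
--             mid.append(c)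
--     return ''.join(top + mid + bot)
-- ===== Notes on version B (the rewrite author's own statement) =====
-- stated objective: alternative
-- what changed: Replaces A's three separate index-stepped scans of the string by a single enumerate pass that buckets each character by i % 4 into top/middle/bottom row lists and joins them.
import Mathlib
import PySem

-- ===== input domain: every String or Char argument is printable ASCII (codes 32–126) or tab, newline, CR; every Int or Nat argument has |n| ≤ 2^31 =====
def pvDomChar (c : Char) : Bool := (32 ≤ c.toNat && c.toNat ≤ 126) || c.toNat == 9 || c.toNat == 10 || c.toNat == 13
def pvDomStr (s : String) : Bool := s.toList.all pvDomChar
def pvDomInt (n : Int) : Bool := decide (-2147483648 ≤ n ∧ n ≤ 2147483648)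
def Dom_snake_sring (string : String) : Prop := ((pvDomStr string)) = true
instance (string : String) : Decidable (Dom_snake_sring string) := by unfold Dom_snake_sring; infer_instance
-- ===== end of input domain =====

-- B replaces A's three index-stepped scans by a single enumerate pass into three row buckets (same O(n) cost, different decomposition).


-- ===== PORT A =====
-- Three 'for i in range(a, len(string), step)' loops appending string[i] to result, then ''.join.
-- string[i] is ported as pyGetD with default ' ': every generated index satisfies 0 ≤ i < len(string),
-- so the default is never read and the port is exact (Python never raises here).
def snake_sring (string : String) : String :=
  let cs := string.toList
  let n := PySem.Str.len string
  let result : List Char := []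
  let result := (PySem.List.pyRange 1 n 4).foldl (fun acc i => acc ++ [PySem.List.pyGetD cs i ' ']) result
  let result := (PySem.List.pyRange 0 n 2).foldl (fun acc i => acc ++ [PySem.List.pyGetD cs i ' ']) result
  let result := (PySem.List.pyRange 3 n 4).foldl (fun acc i => acc ++ [PySem.List.pyGetD cs i ' ']) result
  String.ofList result

-- ===== PORT B =====
-- One pass over enumerate(string): bucket each character by i % 4 into (top, mid, bot), then join top+mid+bot.
def snake_sring_alt (string : String) : String :=
  let rows := (PySem.List.enumerate string.toList).foldl
    (fun (acc : List Char × List Char × List Char) p =>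
      let r := PySem.Int.mod p.1 4
      if r = 1 then (acc.1 ++ [p.2], acc.2.1, acc.2.2)
      else if r = 3 then (acc.1, acc.2.1, acc.2.2 ++ [p.2])
      else (acc.1, acc.2.1 ++ [p.2], acc.2.2))
    ([], [], [])
  String.ofList (rows.1 ++ rows.2.1 ++ rows.2.2)

-- ===== PRECONDITION & SPEC =====
def Spec_snake_sring (string : String) (out : String) : Prop := out = snake_sring_alt string
instance (string : String) (out : String) : Decidable (Spec_snake_sring string out) := by unfold Spec_snake_sring; infer_instance

-- ===== CLAIM (what is proved, stated in full; the proofs are below) =====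
def Claim_equal_snake_sring : Prop := ∀ (string : String), Dom_snake_sring string → Spec_snake_sring string (snake_sring string)

-- ===== LEMMAS AND PROOFS =====

-- The common 4-chunk shape of the snake rows: top / middle / bottom characters of cs.
def pvRows : List Char → List Char × List Char × List Char
  | a :: b :: c :: d :: t =>
      let r := pvRows t
      (b :: r.1, a :: c :: r.2.1, d :: r.2.2)
  | [a, b, c] => ([b], [a, c], [])
  | [a, b] => ([b], [a], [])
  | [a] => ([], [a], [])
  | [] => ([], [], [])

lemma pvShift4 (a n : Int) (ha : 0 ≤ a) (ha4 : a < 4) (hn : 0 ≤ n) :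
    PySem.List.pyRange a (n + 4) 4 = a :: (PySem.List.pyRange a n 4).map (· + 4) := by
  rw [PySem.List.pyRange_of_pos _ _ (by norm_num), PySem.List.pyRange_of_pos _ _ (by norm_num)]
  have hc : (if a < n + 4 then ((n + 4 - a + 4 - 1) / 4).toNat else 0)
      = (if a < n then ((n - a + 4 - 1) / 4).toNat else 0) + 1 := by
    split_ifs <;> omega
  rw [hc, List.range_succ_eq_map]
  simp only [List.map_cons, List.map_map]
  refine congrArg₂ List.cons (by norm_num) ?_
  exact List.map_congr_left fun k _ => by simp [Function.comp]; ring

lemma pvShift2 (n : Int) (hn : 0 ≤ n) :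
    PySem.List.pyRange 0 (n + 4) 2 = 0 :: 2 :: (PySem.List.pyRange 0 n 2).map (· + 4) := by
  rw [PySem.List.pyRange_of_pos _ _ (by norm_num), PySem.List.pyRange_of_pos _ _ (by norm_num)]
  have hc : (if (0:Int) < n + 4 then ((n + 4 - 0 + 2 - 1) / 2).toNat else 0)
      = ((if (0:Int) < n then ((n - 0 + 2 - 1) / 2).toNat else 0) + 1) + 1 := by
    split_ifs <;> omega
  rw [hc, List.range_succ_eq_map, List.range_succ_eq_map]
  simp only [List.map_cons, List.map_map]
  refine congrArg₂ List.cons (by norm_num) ?_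
  refine congrArg₂ List.cons (by norm_num) ?_
  exact List.map_congr_left fun k _ => by simp [Function.comp]; ring

lemma pvGetShift (t : List Char) (a b c d x : Char) (i : Int) (hi : 0 ≤ i) :
    PySem.List.pyGetD (a :: b :: c :: d :: t) (i + 4) x = PySem.List.pyGetD t i x := by
  rw [PySem.List.pyGetD_of_nonneg _ _ (by omega), PySem.List.pyGetD_of_nonneg _ _ hi]
  have h4 : (i + 4).toNat = i.toNat + 4 := by omega
  simp [h4]

-- A's first loop produces the top row.
lemma pvRowA1 (cs : List Char) :
    (PySem.List.pyRange 1 (cs.length : Int) 4).map (fun i => PySem.List.pyGetD cs i ' ')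
      = (pvRows cs).1 := by
  induction cs using pvRows.induct with
  | case1 a b c d t ih =>
      have hlen : ((a :: b :: c :: d :: t).length : Int) = (t.length : Int) + 4 := by
        simp; ring
      rw [hlen, pvShift4 1 _ (by norm_num) (by norm_num) (by positivity)]
      simp only [List.map_cons, List.map_map, pvRows]
      congr 1
      · simp [PySem.List.pyGetD_ofNat']
      rw [← ih]
      exact List.map_congr_left fun i hmem => by
        have := (PySem.List.mem_pyRange_iff_of_pos (by norm_num) i).mp hmem
        simpa [Function.comp] using pvGetShift t a b c d ' ' i (by omega)
  | case2 a b c =>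
      rw [show ((([a,b,c] : List Char).length : Int)) = 3 by simp,
          show PySem.List.pyRange 1 3 4 = [1] from by decide]
      simp [pvRows, PySem.List.pyGetD_ofNat']
  | case3 a b =>
      rw [show ((([a,b] : List Char).length : Int)) = 2 by simp,
          show PySem.List.pyRange 1 2 4 = [1] from by decide]
      simp [pvRows, PySem.List.pyGetD_ofNat']
  | case4 a =>
      rw [show ((([a] : List Char).length : Int)) = 1 by simp,
          show PySem.List.pyRange 1 1 4 = [] from by decide]
      simp [pvRows]
  | case5 =>
      rw [show ((([] : List Char).length : Int)) = 0 by simp,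
          show PySem.List.pyRange 1 0 4 = [] from by decide]
      simp [pvRows]

-- A's second loop produces the middle row.
lemma pvRowA2 (cs : List Char) :
    (PySem.List.pyRange 0 (cs.length : Int) 2).map (fun i => PySem.List.pyGetD cs i ' ')
      = (pvRows cs).2.1 := by
  induction cs using pvRows.induct with
  | case1 a b c d t ih =>
      have hlen : ((a :: b :: c :: d :: t).length : Int) = (t.length : Int) + 4 := by
        simp; ring
      rw [hlen, pvShift2 _ (by positivity)]
      simp only [List.map_cons, List.map_map, pvRows]
      congr 1
      · simp [PySem.List.pyGetD_ofNat']
      congr 1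
      · simp [PySem.List.pyGetD_ofNat']
      rw [← ih]
      exact List.map_congr_left fun i hmem => by
        have := (PySem.List.mem_pyRange_iff_of_pos (by norm_num) i).mp hmem
        simpa [Function.comp] using pvGetShift t a b c d ' ' i (by omega)
  | case2 a b c =>
      rw [show ((([a,b,c] : List Char).length : Int)) = 3 by simp,
          show PySem.List.pyRange 0 3 2 = [0, 2] from by decide]
      simp [pvRows, PySem.List.pyGetD_ofNat']
  | case3 a b =>
      rw [show ((([a,b] : List Char).length : Int)) = 2 by simp,
          show PySem.List.pyRange 0 2 2 = [0] from by decide]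
      simp [pvRows, PySem.List.pyGetD_ofNat']
  | case4 a =>
      rw [show ((([a] : List Char).length : Int)) = 1 by simp,
          show PySem.List.pyRange 0 1 2 = [0] from by decide]
      simp [pvRows, PySem.List.pyGetD_ofNat']
  | case5 =>
      rw [show ((([] : List Char).length : Int)) = 0 by simp,
          show PySem.List.pyRange 0 0 2 = [] from by decide]
      simp [pvRows]

-- A's third loop produces the bottom row.
lemma pvRowA3 (cs : List Char) :
    (PySem.List.pyRange 3 (cs.length : Int) 4).map (fun i => PySem.List.pyGetD cs i ' ')
      = (pvRows cs).2.2 := by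
  induction cs using pvRows.induct with
  | case1 a b c d t ih =>
      have hlen : ((a :: b :: c :: d :: t).length : Int) = (t.length : Int) + 4 := by
        simp; ring
      rw [hlen, pvShift4 3 _ (by norm_num) (by norm_num) (by positivity)]
      simp only [List.map_cons, List.map_map, pvRows]
      congr 1
      · simp [PySem.List.pyGetD_ofNat']
      rw [← ih]
      exact List.map_congr_left fun i hmem => by
        have := (PySem.List.mem_pyRange_iff_of_pos (by norm_num) i).mp hmem
        simpa [Function.comp] using pvGetShift t a b c d ' ' i (by omega)
  | case2 a b c =>
      rw [show ((([a,b,c] : List Char).length : Int)) = 3 by simp,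
          show PySem.List.pyRange 3 3 4 = [] from by decide]
      simp [pvRows]
  | case3 a b =>
      rw [show ((([a,b] : List Char).length : Int)) = 2 by simp,
          show PySem.List.pyRange 3 2 4 = [] from by decide]
      simp [pvRows]
  | case4 a =>
      rw [show ((([a] : List Char).length : Int)) = 1 by simp,
          show PySem.List.pyRange 3 1 4 = [] from by decide]
      simp [pvRows]
  | case5 =>
      rw [show ((([] : List Char).length : Int)) = 0 by simp,
          show PySem.List.pyRange 3 0 4 = [] from by decide]
      simp [pvRows]

-- B's single pass produces the three rows at once (generalized over the 4-divisible start index and the accumulators).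
lemma pvRowsB (cs : List Char) : ∀ (s : Int), 4 ∣ s → ∀ (t m b : List Char),
    (PySem.List.enumerate cs s).foldl
      (fun (acc : List Char × List Char × List Char) p =>
        let r := PySem.Int.mod p.1 4
        if r = 1 then (acc.1 ++ [p.2], acc.2.1, acc.2.2)
        else if r = 3 then (acc.1, acc.2.1, acc.2.2 ++ [p.2])
        else (acc.1, acc.2.1 ++ [p.2], acc.2.2))
      (t, m, b)
      = (t ++ (pvRows cs).1, m ++ (pvRows cs).2.1, b ++ (pvRows cs).2.2) := by
  induction cs using pvRows.induct with
  | case1 a b c d tl ih =>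
      intro s hdvd t m bb
      have h0 : PySem.Int.mod s 4 = 0 := by
        rw [PySem.Int.mod_eq_emod_of_pos (by norm_num)]; omega
      have h1 : PySem.Int.mod (s + 1) 4 = 1 := by
        rw [PySem.Int.mod_eq_emod_of_pos (by norm_num)]; omega
      have h2 : PySem.Int.mod (s + 2) 4 = 2 := by
        rw [PySem.Int.mod_eq_emod_of_pos (by norm_num)]; omega
      have h3 : PySem.Int.mod (s + 1 + 1 + 1) 4 = 3 := by
        rw [PySem.Int.mod_eq_emod_of_pos (by norm_num)]; omega
      have h2' : PySem.Int.mod (s + 1 + 1) 4 = 2 := by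
        rw [PySem.Int.mod_eq_emod_of_pos (by norm_num)]; omega
      simp only [PySem.List.enumerate_cons, List.foldl_cons, h0, h1, h2', h3, reduceIte]
      rw [show s + 1 + 1 + 1 + 1 = s + 4 from by ring, ih (s + 4) (by omega)]
      simp [pvRows, List.append_assoc]
  | case2 a b c =>
      intro s hdvd t m bb
      have h0 : PySem.Int.mod s 4 = 0 := by
        rw [PySem.Int.mod_eq_emod_of_pos (by norm_num)]; omega
      have h1 : PySem.Int.mod (s + 1) 4 = 1 := by
        rw [PySem.Int.mod_eq_emod_of_pos (by norm_num)]; omega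
      have h2' : PySem.Int.mod (s + 1 + 1) 4 = 2 := by
        rw [PySem.Int.mod_eq_emod_of_pos (by norm_num)]; omega
      simp only [PySem.List.enumerate_cons, List.foldl_cons, h0, h1, h2', reduceIte]
      simp [pvRows]
  | case3 a b =>
      intro s hdvd t m bb
      have h0 : PySem.Int.mod s 4 = 0 := by
        rw [PySem.Int.mod_eq_emod_of_pos (by norm_num)]; omega
      have h1 : PySem.Int.mod (s + 1) 4 = 1 := by
        rw [PySem.Int.mod_eq_emod_of_pos (by norm_num)]; omega
      simp only [PySem.List.enumerate_cons, List.foldl_cons, h0, h1, reduceIte]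
      simp [pvRows]
  | case4 a =>
      intro s hdvd t m bb
      have h0 : PySem.Int.mod s 4 = 0 := by
        rw [PySem.Int.mod_eq_emod_of_pos (by norm_num)]; omega
      simp only [PySem.List.enumerate_cons, List.foldl_cons, h0]
      simp [pvRows]
  | case5 =>
      intro s hdvd t m bb
      simp [PySem.List.enumerate, pvRows]

-- ===== VERDICT (by name: the statement is the Claim_ definition above) =====
theorem snake_sring_spec : Claim_equal_snake_sring := by
  intro string _
  unfold Spec_snake_sring snake_sring snake_sring_alt
  simp only [PySem.Str.len_eq, PySem.List.foldl_append_singleton_eq_map]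
  rw [pvRowsB string.toList 0 (by norm_num)]
  rw [pvRowA1, pvRowA2, pvRowA3]
  simp [List.append_assoc]
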